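-- pv_equiv track=rewrite | github.com/aleattene/python-workbook | chap_05/exe_120_string_list_formatting.py | formatStringList
-- ===== SOURCE A (Python) =====
-- def formatStringList(string_list):
--     length_list = len(string_list)
--     all_string = ""
--     if length_list == 0:
--         all_string += "NO ITEMS ENTERED."
--     if length_list == 1:
--         all_string += string_list[0]
--     elif length_list == 2:
--         all_string += string_list[0] + " and " + string_list[1]
--     elif length_list > 2:
--         for i in range(length_list-2):
--             all_string += string_list[i] + ", "
--         all_string += string_list[-2] + " and " + string_list[-1]
--     return all_string
-- ===== SOURCE B (Python) =====
-- def formatStringList(string_list):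
--     if not string_list:
--         return "NO ITEMS ENTERED."
--     rev = []
--     sep = ""
--     for s in reversed(string_list):
--         rev.append(sep)
--         rev.append(s)
--         sep = " and " if sep == "" else ", "
--     return "".join(reversed(rev))
-- ===== Notes on version B (the rewrite author's own statement) =====
-- stated objective: alternative
-- what changed: Replaces A's four-way branch with an accumulator string and a forward index loop over range(len-2) by a back-to-front construction: one pass over reversed(string_list) with a separator state machine ('' -> ' and ' -> ', ') collecting pieces into a list, finished by a single reverse-and-join; no index arithmetic or string accumulator remains.
import Mathlib
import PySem

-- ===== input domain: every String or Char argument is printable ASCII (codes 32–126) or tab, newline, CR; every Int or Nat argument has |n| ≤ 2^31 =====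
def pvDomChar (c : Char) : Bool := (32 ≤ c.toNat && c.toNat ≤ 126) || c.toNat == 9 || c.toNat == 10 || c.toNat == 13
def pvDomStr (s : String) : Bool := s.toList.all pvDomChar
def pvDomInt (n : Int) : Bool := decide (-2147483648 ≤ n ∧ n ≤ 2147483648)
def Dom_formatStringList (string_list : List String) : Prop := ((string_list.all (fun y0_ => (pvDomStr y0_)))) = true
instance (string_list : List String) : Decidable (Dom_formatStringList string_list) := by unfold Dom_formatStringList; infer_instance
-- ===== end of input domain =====

-- B replaces A's accumulator string and forward index loop by a back-to-front construction:
-- one pass over the reversed list with a separator state machine, then a single reverse-and-join.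

-- ===== PORT A =====
def formatStringList (string_list : List String) : String :=
  let length_list : Int := PySem.List.len string_list
  let all_string : String := ""
  -- 'if length_list == 0: all_string += "NO ITEMS ENTERED."'
  let all_string : String :=
    if length_list = 0 then all_string ++ "NO ITEMS ENTERED." else all_string
  if length_list = 1 then
    all_string ++ PySem.List.pyGetD string_list 0 ""
  else if length_list = 2 then
    all_string ++ (PySem.List.pyGetD string_list 0 "" ++ " and " ++ PySem.List.pyGetD string_list 1 "")
  else if length_list > 2 then
    -- indices 0 .. length-3 are in range, and so are -2 and -1 (length > 2): pyGetD is exact here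
    ((PySem.List.pyRange 0 (length_list - 2) 1).foldl
        (fun acc i => acc ++ (PySem.List.pyGetD string_list i "" ++ ", ")) all_string)
      ++ (PySem.List.pyGetD string_list (-2) "" ++ " and " ++ PySem.List.pyGetD string_list (-1) "")
  else
    all_string

-- ===== PORT B =====
-- loop body: 'rev.append(sep); rev.append(s); sep = " and " if sep == "" else ", "'
def fslStep (st : List String × String) (s : String) : List String × String :=
  (st.1 ++ [st.2] ++ [s], if st.2 = "" then " and " else ", ")

def formatStringList_alt (string_list : List String) : String :=
  match string_list with
  | [] => "NO ITEMS ENTERED."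
  | xs =>
    -- 'for s in reversed(string_list): …' then '"".join(reversed(rev))'
    let st := xs.reverse.foldl fslStep ([], "")
    PySem.Str.join "" st.1.reverse

-- ===== PRECONDITION & SPEC =====
def Spec_formatStringList (string_list : List String) (out : String) : Prop := out = formatStringList_alt string_list
instance (string_list : List String) (out : String) : Decidable (Spec_formatStringList string_list out) := by unfold Spec_formatStringList; infer_instance

-- ===== CLAIM (what is proved, stated in full; the proofs are below) =====
def Claim_equal_formatStringList : Prop := ∀ (string_list : List String), Dom_formatStringList string_list → Spec_formatStringList string_list (formatStringList string_list)

-- ===== LEMMAS AND PROOFS =====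

-- proof-only intermediate: the recursive shape of the sentence
def fslRec : List String → String
  | [] => ""
  | [x] => x
  | [x, y] => x ++ " and " ++ y
  | x :: rest => x ++ ", " ++ fslRec rest

-- proof-only intermediate: the piece list B's loop builds (in forward order)
def fslPieces : List String → List String
  | [] => []
  | [x] => [x, ""]
  | [x, y] => [x, " and ", y, ""]
  | x :: rest => x :: ", " :: fslPieces rest

theorem join_sep_singleton (sep p : String) : PySem.Str.join sep [p] = p := by
  simp [PySem.Str.join, PySem.Chars.join_singleton]

theorem join_sep_cons (sep p q : String) (t : List String) :
    PySem.Str.join sep (p :: q :: t) = p ++ sep ++ PySem.Str.join sep (q :: t) := by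
  simp only [PySem.Str.join, List.map_cons]
  rw [PySem.Chars.join_cons_cons, String.ofList_append, String.ofList_append,
    String.ofList_toList, String.ofList_toList]

-- the reversed piece list, joined on "", is the recursive sentence
theorem join_pieces (xs : List String) (h : xs ≠ []) :
    PySem.Str.join "" (fslPieces xs) = fslRec xs := by
  induction xs with
  | nil => exact absurd rfl h
  | cons x rest ih =>
    cases rest with
    | nil =>
      show PySem.Str.join "" [x, ""] = x
      rw [join_sep_cons, join_sep_singleton]
      simp
    | cons y t =>
      cases t with
      | nil =>
        show PySem.Str.join "" [x, " and ", y, ""] = x ++ " and " ++ y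
        rw [join_sep_cons, join_sep_cons, join_sep_cons, join_sep_singleton]
        simp [String.append_assoc]
      | cons c t' =>
        show PySem.Str.join "" (x :: ", " :: fslPieces (y :: c :: t'))
          = x ++ ", " ++ fslRec (y :: c :: t')
        obtain ⟨z, w, hz⟩ : ∃ z w, fslPieces (y :: c :: t') = z :: w := by
          cases t' with
          | nil => exact ⟨_, _, rfl⟩
          | cons d t'' => exact ⟨_, _, rfl⟩
        rw [hz, join_sep_cons, join_sep_cons, ← hz, ih (by simp)]
        simp [String.append_assoc]

-- loop invariant: the fold over the reversed list builds fslPieces in reverse,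
-- with separator state "" -> " and " -> ", "
theorem fslState (x : String) (rest : List String) :
    (List.foldr (fun s st => fslStep st s) (([] : List String), "") (x :: rest)).1.reverse
        = fslPieces (x :: rest)
      ∧ (List.foldr (fun s st => fslStep st s) (([] : List String), "") (x :: rest)).2
        = (if rest = [] then " and " else ", ") := by
  induction rest generalizing x with
  | nil => constructor <;> rfl
  | cons y t ih =>
    obtain ⟨ih1, ih2⟩ := ih y
    have hsep : (List.foldr (fun s st => fslStep st s) (([] : List String), "") (y :: t)).2 ≠ "" := by
      rw [ih2]; split_ifs <;> decide
    constructor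
    · show (fslStep (List.foldr (fun s st => fslStep st s) ([], "") (y :: t)) x).1.reverse = _
      rw [fslStep]
      simp only [List.reverse_append, List.reverse_cons, List.reverse_nil, List.nil_append,
        List.cons_append, ih1, ih2]
      cases t with
      | nil => rfl
      | cons c t' => rfl
    · show (fslStep (List.foldr (fun s st => fslStep st s) ([], "") (y :: t)) x).2 = _
      rw [fslStep]
      show (if (List.foldr (fun s st => fslStep st s) ([], "") (y :: t)).2 = ""
            then " and " else ", ") = _
      rw [ih2]
      cases t <;> simp

-- B's port computes the recursive sentence on every nonempty list
theorem alt_eq_fslRec (x : String) (rest : List String) :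
    formatStringList_alt (x :: rest) = fslRec (x :: rest) := by
  show PySem.Str.join ""
      (((x :: rest).reverse.foldl fslStep ([], "")).1.reverse) = _
  rw [List.foldl_reverse, (fslState x rest).1, join_pieces _ (by simp)]

-- ", ".join of a snoc list equals A's comma-append loop followed by the last element.
theorem join_snoc_eq_foldl (ys : List String) (p : String) (acc : String) :
    acc ++ PySem.Str.join ", " (ys ++ [p])
      = ys.foldl (fun a s => a ++ (s ++ ", ")) acc ++ p := by
  induction ys generalizing acc with
  | nil => simp [join_sep_singleton]
  | cons y ys ih =>
    obtain ⟨z, t, hz⟩ : ∃ z t, ys ++ [p] = z :: t := by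
      cases h : ys ++ [p] with
      | nil => exact absurd h (by simp)
      | cons z t => exact ⟨z, t, rfl⟩
    calc acc ++ PySem.Str.join ", " ((y :: ys) ++ [p])
        = acc ++ (y ++ ", " ++ PySem.Str.join ", " (ys ++ [p])) := by
          rw [List.cons_append, hz, join_sep_cons, ← hz]
      _ = (acc ++ (y ++ ", ")) ++ PySem.Str.join ", " (ys ++ [p]) := by
          simp [String.append_assoc]
      _ = ys.foldl (fun a s => a ++ (s ++ ", ")) (acc ++ (y ++ ", ")) ++ p := ih _
      _ = (y :: ys).foldl (fun a s => a ++ (s ++ ", ")) acc ++ p := by simp [List.foldl_cons]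

-- the recursive sentence on ys ++ [p, q] is one comma-join over ys ++ [p] plus the ' and ' tail
theorem fslRec_eq (ys : List String) (p q : String) :
    fslRec (ys ++ [p, q]) = PySem.Str.join ", " (ys ++ [p]) ++ " and " ++ q := by
  induction ys with
  | nil => simp [fslRec, join_sep_singleton]
  | cons y ys ih =>
    obtain ⟨z, w, t, hz⟩ : ∃ z w t, ys ++ [p, q] = z :: w :: t := by
      cases ys with
      | nil => exact ⟨p, q, [], rfl⟩
      | cons a b =>
        cases h : b ++ [p, q] with
        | nil => exact absurd h (by simp)
        | cons w t => exact ⟨a, w, t, by simp [h]⟩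
    obtain ⟨z', t', hz'⟩ : ∃ z' t', ys ++ [p] = z' :: t' := by
      cases h : ys ++ [p] with
      | nil => exact absurd h (by simp)
      | cons z' t' => exact ⟨z', t', rfl⟩
    calc fslRec ((y :: ys) ++ [p, q])
        = y ++ ", " ++ fslRec (ys ++ [p, q]) := by rw [List.cons_append, hz]; rfl
      _ = y ++ ", " ++ (PySem.Str.join ", " (ys ++ [p]) ++ " and " ++ q) := by rw [ih]
      _ = PySem.Str.join ", " ((y :: ys) ++ [p]) ++ " and " ++ q := by
          rw [List.cons_append, hz', join_sep_cons, ← hz']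
          simp [String.append_assoc]

theorem dropLast_snoc_of_two_le (xs : List String) (h : 2 ≤ xs.length) :
    xs.dropLast = xs.dropLast.dropLast ++ [xs[xs.length - 2]'(by omega)] := by
  have h1 : xs.dropLast = xs.take (xs.length - 1) := List.dropLast_eq_take
  have h2 : xs.dropLast.dropLast = xs.take (xs.length - 2) := by
    rw [h1, List.dropLast_eq_take]
    simp [List.take_take]
    omega
  rw [h2, h1]
  have h3 : xs.length - 1 = (xs.length - 2) + 1 := by omega
  rw [h3, List.take_add_one, List.getElem?_eq_getElem (by omega)]
  simp

-- xs with at least two elements splits as dropLast.dropLast ++ [second-to-last, last]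
theorem eq_dd_snoc2 (xs : List String) (h : 2 ≤ xs.length) :
    xs = xs.dropLast.dropLast
           ++ [xs[xs.length - 2]'(by omega), xs[xs.length - 1]'(by omega)] := by
  have hne : xs ≠ [] := by intro h0; simp [h0] at h
  conv_lhs => rw [← List.dropLast_append_getLast hne]
  rw [List.getLast_eq_getElem, dropLast_snoc_of_two_le xs h]
  simp

-- the first length-2 elements read by A's loop are those of dropLast.dropLast
theorem getD_eq_of_dd (xs : List String) (k : Nat) (hk : k < xs.dropLast.dropLast.length) :
    List.getD xs k "" = List.getD xs.dropLast.dropLast k "" := by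
  have h1 : k < xs.dropLast.length := by simp only [List.length_dropLast] at hk ⊢; omega
  have h2 : k < xs.length := by simp only [List.length_dropLast] at hk; omega
  simp only [List.getD_eq_getElem?_getD, List.getElem?_eq_getElem h2,
    List.getElem?_eq_getElem hk, Option.getD_some, List.getElem_dropLast]

-- main case: three or more items
theorem main_long (x y c : String) (t : List String) :
    formatStringList (x :: y :: c :: t) = formatStringList_alt (x :: y :: c :: t) := by
  set xs : List String := x :: y :: c :: t with hxs
  have hlen : 3 ≤ xs.length := by simp [hxs]
  have h0 : ¬((xs.length : Int) = 0) := by omega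
  have h1 : ¬((xs.length : Int) = 1) := by omega
  have h2 : ¬((xs.length : Int) = 2) := by omega
  have h3 : ((xs.length : Int) > 2) := by omega
  set ys : List String := xs.dropLast.dropLast with hys
  have hyl : ys.length = xs.length - 2 := by
    rw [hys]; simp only [List.length_dropLast]; omega
  have hcast : ((xs.length : Int) - 2) = (ys.length : Int) := by omega
  -- evaluate A's branch
  have hA : formatStringList xs =
      ((PySem.List.pyRange 0 ((xs.length : Int) - 2) 1).foldl
          (fun acc i => acc ++ (PySem.List.pyGetD xs i "" ++ ", ")) "")
        ++ (PySem.List.pyGetD xs (-2) "" ++ " and " ++ PySem.List.pyGetD xs (-1) "") := by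
    simp only [formatStringList, PySem.List.len_eq]
    rw [if_neg h1, if_neg h2, if_pos h3, if_neg h0]
  rw [hA, hcast]
  -- the loop reads only the first length-2 elements: fold over ys instead
  have hFG : ∀ (acc : String), ∀ i ∈ PySem.List.pyRange 0 (ys.length : Int) 1,
      acc ++ (PySem.List.pyGetD xs i "" ++ ", ") = acc ++ (PySem.List.pyGetD ys i "" ++ ", ") := by
    intro acc i hi
    obtain ⟨hi0, hi1⟩ := (PySem.List.mem_pyRange_one).1 hi
    obtain ⟨k, rfl⟩ : ∃ k : Nat, i = (k : Int) := ⟨i.toNat, by omega⟩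
    have hk : k < ys.length := by exact_mod_cast hi1
    simp only [PySem.List.pyGetD_natCast]
    rw [getD_eq_of_dd xs k (hys ▸ hk)]
  rw [PySem.List.foldl_congr_mem _ _ _ _ hFG,
      PySem.List.foldl_pyRange_zero_pyGetD' ys "" (fun a s => a ++ (s ++ ", ")) ""]
  -- negative indices
  rw [PySem.List.pyGetD_neg_ofNat xs 2 "" (by omega) (by omega),
      PySem.List.pyGetD_neg_ofNat xs 1 "" (by omega) (by omega)]
  -- evaluate B's branch via the loop invariant: alt xs = fslRec xs, then split xs = ys ++ [a, b]
  rw [show formatStringList_alt xs = fslRec xs from alt_eq_fslRec x (y :: c :: t)]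
  conv_rhs => rw [eq_dd_snoc2 xs (by omega)]
  rw [← hys, fslRec_eq]
  have hj := join_snoc_eq_foldl ys (xs[xs.length - 2]'(by omega)) ""
  simp only [String.empty_append] at hj
  rw [hj]
  simp [String.append_assoc]

theorem main_cons_cons (x y : String) (rest : List String) :
    formatStringList (x :: y :: rest) = formatStringList_alt (x :: y :: rest) := by
  cases rest with
  | nil =>
    rw [alt_eq_fslRec]
    simp [formatStringList, fslRec, PySem.List.len, PySem.List.pyGetD]
  | cons c t => exact main_long x y c t

-- ===== VERDICT (by name: the statement is the Claim_ definition above) =====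
theorem formatStringList_spec : Claim_equal_formatStringList := by
  intro xs _
  unfold Spec_formatStringList
  match xs with
  | [] => decide
  | [x] =>
    show formatStringList [x] = formatStringList_alt [x]
    rw [alt_eq_fslRec]
    simp [formatStringList, fslRec, PySem.List.pyGetD_zero_cons]
  | x :: y :: rest => exact main_cons_cons x y rest
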